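-- pv_equiv track=rewrite | github.com/alexsfking/python_exercises | codewars/alphabet_slices.py | solution
-- ===== SOURCE A (Python) =====
-- def solution(s:str):
--     stack=[]
--     out=[]
--     increasing,decreasing=False,False
--     for i in range(len(s)-1):
--         char_value=ord(s[i])
--         next_char_value=ord(s[i+1])
--         if(char_value==next_char_value+1 and not increasing):
--             decreasing=True
--             stack.append(s[i])
--         elif(char_value==next_char_value-1 and not decreasing):
--             increasing=True
--             stack.append(s[i])
--         elif(increasing):
--             stack.append(s[i])
--             increasing=False
--             while(stack):
--                 out.append(stack.pop())
--         elif(decreasing):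
--             stack.append(s[i])
--             decreasing=False
--             while(stack):
--                 out.append(stack.pop())
--         else:
--             out.append(s[i])
--     if(increasing or decreasing):
--         stack.append(s[-1])
--     while(stack):
--         out.append(stack.pop())
--     if(increasing or decreasing):
--         pass
--     else:
--         out.append(s[-1])
--     return "".join(out)
-- ===== SOURCE B (Python) =====
-- def solution(s: str):
--     # Phase 1: split s into maximal runs (direction locked by the first +/-1 step,
--     # the breaking character closes the current run). Phase 2: reverse each run and join.
--     runs = []
--     cur = []
--     d = 0
--     for ch in s:
--         if not cur:
--             cur = [ch]
--         else:
--             step = ord(ch) - ord(cur[-1])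
--             if d == 0 and step in (1, -1):
--                 d = step
--                 cur.append(ch)
--             elif d != 0 and step == d:
--                 cur.append(ch)
--             else:
--                 runs.append(cur)
--                 cur = [ch]
--                 d = 0
--     if cur:
--         runs.append(cur)
--     return "".join("".join(reversed(r)) for r in runs)
-- ===== Notes on version B (the rewrite author's own statement) =====
-- stated objective: simpler
-- what changed: Replaces A's twin-boolean-flag state machine with an explicit stack flushed by a while-pop and special end-of-string handling by a split-into-maximal-runs pass followed by reverse-each-run-and-join.
import Mathlib
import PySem

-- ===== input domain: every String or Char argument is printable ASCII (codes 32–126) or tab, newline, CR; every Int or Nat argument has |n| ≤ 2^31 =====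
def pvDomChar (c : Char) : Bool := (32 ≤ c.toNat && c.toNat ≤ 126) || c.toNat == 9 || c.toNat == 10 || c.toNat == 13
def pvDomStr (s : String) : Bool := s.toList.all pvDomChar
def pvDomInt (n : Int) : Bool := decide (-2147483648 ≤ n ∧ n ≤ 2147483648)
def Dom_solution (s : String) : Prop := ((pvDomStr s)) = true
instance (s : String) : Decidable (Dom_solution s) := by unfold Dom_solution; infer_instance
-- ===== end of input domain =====

-- B replaces A's twin-flag stack machine by a split-into-runs pass followed by
-- reverse-each-run-and-join (simpler decomposition; not faster).

-- ===== PORT A =====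
-- A's loop reads the pair s[i], s[i+1]; ported as recursion on the char list with
-- the pair as the first two elements.  The Python stack (append/pop at the end)
-- is represented most-recent-first, so push = cons and pop-all = append as-is.
def solutionLoopA : List Char → List Char → List Char → Bool → Bool → List Char
  | c :: c' :: rest, stack, out, inc, dec =>
    if c.toNat = c'.toNat + 1 ∧ inc = false then
      solutionLoopA (c' :: rest) (c :: stack) out inc true
    else if c.toNat + 1 = c'.toNat ∧ dec = false then
      solutionLoopA (c' :: rest) (c :: stack) out true dec
    else if inc = true then
      solutionLoopA (c' :: rest) [] (out ++ c :: stack) false dec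
    else if dec = true then
      solutionLoopA (c' :: rest) [] (out ++ c :: stack) inc false
    else
      solutionLoopA (c' :: rest) stack (out ++ [c]) inc dec
  | [c], stack, out, inc, dec =>
    -- after the loop: push s[-1] and flush iff a run is open, else flush (empty) stack and append s[-1]
    if inc = true ∨ dec = true then out ++ c :: stack else out ++ stack ++ [c]
  | [], _, out, _, _ => out  -- unreachable under Pre_ (Python raises IndexError on "")

def solution (s : String) : String := String.ofList (solutionLoopA s.toList [] [] false false)

-- ===== PORT B =====
-- one step of B's for-loop over the chars; state = (runs, cur, d)
def solutionStepB : (List (List Char) × List Char × Int) → Char → (List (List Char) × List Char × Int)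
  | (runs, cur, d), ch =>
    match cur.getLast? with
    | none => (runs, [ch], d)
    | some p =>
      let step : Int := (ch.toNat : Int) - (p.toNat : Int)
      if d = 0 ∧ (step = 1 ∨ step = -1) then (runs, cur ++ [ch], step)
      else if d ≠ 0 ∧ step = d then (runs, cur ++ [ch], d)
      else (runs ++ [cur], [ch], 0)

-- B's last two lines: close the pending run, reverse every run and join
def solutionFinishB : (List (List Char) × List Char × Int) → List Char
  | (runs, cur, _) => (((if cur ≠ [] then runs ++ [cur] else runs)).map List.reverse).flatten

def solution_alt (s : String) : String :=
  String.ofList (solutionFinishB (s.toList.foldl solutionStepB ([], [], 0)))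

-- ===== PRECONDITION & SPEC =====
-- Pre_ excludes only the empty string, on which A raises IndexError (s[-1]).
def Pre_solution (s : String) : Prop := s ≠ ""
instance (s : String) : Decidable (Pre_solution s) := by unfold Pre_solution; infer_instance
def pvWitness_solution : String := "ab"

def Spec_solution (s : String) (out : String) : Prop := out = solution_alt s
instance (s : String) (out : String) : Decidable (Spec_solution s out) := by unfold Spec_solution; infer_instance

-- ===== CLAIM (what is proved, stated in full; the proofs are below) =====
def Claim_equal_solution : Prop := ∀ (s : String), Dom_solution s → Pre_solution s → Spec_solution s (solution s)

-- ===== LEMMAS AND PROOFS =====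

-- Simulation invariant: after both machines have consumed the same prefix,
-- A's remaining input is c :: rest, its stack holds the open run minus c
-- (most-recent-first), B's cur is that run including c, A's flags encode B's d,
-- and A's out is the join of B's closed runs (reversed).
lemma solution_key : ∀ (rest : List Char) (c : Char) (stack : List Char)
    (runs : List (List Char)) (d : Int),
    (d = -1 ∨ d = 0 ∨ d = 1) → (d = 0 → stack = []) →
    solutionLoopA (c :: rest) stack ((runs.map List.reverse).flatten) (d == 1) (d == -1) =
      solutionFinishB (rest.foldl solutionStepB (runs, stack.reverse ++ [c], d)) := by
  intro rest
  induction rest with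
  | nil =>
    intro c stack runs d hd hz
    simp only [solutionLoopA, List.foldl, solutionFinishB]
    rcases hd with h | h | h <;> subst h <;> simp_all
  | cons c' rest ih =>
    intro c stack runs d hd hz
    have hlast : (stack.reverse ++ [c]).getLast? = some c := List.getLast?_concat
    rcases hd with h | h | h
    · -- d = -1 (decreasing run open)
      subst h
      simp only [solutionLoopA, List.foldl, solutionStepB, hlast]
      split_ifs with h1 h2 h3 h4 h5 h6 h7 h8 <;>
        first
        | (exfalso; simp_all; omega)
        | (exfalso; simp_all; done)
        | -- extend the run: push c, d stays -1
          (simpa using ih c' (c :: stack) runs (-1) (by omega) (by omega))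
        | -- break: flush = close the run
          (have hout : ((runs.map List.reverse).flatten ++ c :: stack) =
              ((runs ++ [stack.reverse ++ [c]]).map List.reverse).flatten := by simp
           rw [hout]
           simpa using ih c' [] (runs ++ [stack.reverse ++ [c]]) 0 (by omega) (fun _ => rfl))
    · -- d = 0 (no run open, stack empty)
      subst h
      have hst := hz rfl
      subst hst
      simp only [solutionLoopA, List.foldl, solutionStepB, hlast]
      split_ifs with h1 h2 h3 h4 h5 h6 h7 h8 <;>
        first
        | (exfalso; simp_all; omega)
        | (exfalso; simp_all; done)
        | -- lock decreasing
          (have hs : ((c'.toNat : Int) - (c.toNat : Int)) = -1 := by omega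
           rw [hs]
           simpa using ih c' (c :: []) runs (-1) (by omega) (by omega))
        | -- lock increasing
          (have hs : ((c'.toNat : Int) - (c.toNat : Int)) = 1 := by omega
           rw [hs]
           simpa using ih c' (c :: []) runs 1 (by omega) (by omega))
        | -- plain character
          (have hout : ((runs.map List.reverse).flatten ++ [c]) =
              ((runs ++ [[c]]).map List.reverse).flatten := by simp
           rw [hout]
           simpa using ih c' [] (runs ++ [[c]]) 0 (by omega) (fun _ => rfl))
    · -- d = 1 (increasing run open)
      subst h
      simp only [solutionLoopA, List.foldl, solutionStepB, hlast]
      split_ifs with h1 h2 h3 h4 h5 h6 h7 h8 <;>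
        first
        | (exfalso; simp_all; omega)
        | (exfalso; simp_all; done)
        | -- extend the run: push c, d stays 1
          (simpa using ih c' (c :: stack) runs 1 (by omega) (by omega))
        | (have hout : ((runs.map List.reverse).flatten ++ c :: stack) =
              ((runs ++ [stack.reverse ++ [c]]).map List.reverse).flatten := by simp
           rw [hout]
           simpa using ih c' [] (runs ++ [stack.reverse ++ [c]]) 0 (by omega) (fun _ => rfl))

-- ===== VERDICT (by name: the statement is the Claim_ definition above) =====
theorem solution_spec : Claim_equal_solution := by
  intro s _ hpre
  unfold Spec_solution solution solution_alt
  have hne : s.toList ≠ [] := by simp_all [Pre_solution]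
  obtain ⟨c, rest, hcr⟩ : ∃ c rest, s.toList = c :: rest := by
    cases h : s.toList with
    | nil => exact absurd h hne
    | cons a l => exact ⟨a, l, rfl⟩
  rw [hcr]
  have := solution_key rest c [] [] 0 (by omega) (fun _ => rfl)
  simp only [List.map_nil, List.flatten_nil, List.reverse_nil, List.nil_append] at this
  rw [show ((0 : Int) == 1) = false by decide, show ((0 : Int) == -1) = false by decide] at this
  -- B's foldl starts from cur = []; its first step just sets cur = [c]
  have hfirst : (c :: rest).foldl solutionStepB ([], [], 0) =
      rest.foldl solutionStepB ([], [c], 0) := by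
    simp [List.foldl, solutionStepB]
  rw [hfirst, this]
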